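-- pv_equiv track=rewrite | github.com/adnan2002/trad | appv4.py | standardize_symbol
-- ===== SOURCE A (Python) =====
-- def standardize_symbol(raw_symbol):
--     symbol_aliases = {
--     "BNB": ["BNB", "BNBUSDT", "Binance Coin"],
--     "ADA": ["ADA", "ADAUSDT", "Cardano"],
--     "SOL": ["SOL", "SOLUSDT", "Solana"],
--     "XRP": ["XRP", "XRPUSDT", "Ripple"],
--     "DOT": ["DOT", "DOTUSDT", "Polkadot"],
--     "DOGE": ["DOGE", "DOGEUSDT", "Dogecoin"],
--     "AVAX": ["AVAX", "AVAXUSDT", "Avalanche"],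
--     "SHIB": ["SHIB", "SHIBUSDT", "Shiba Inu"],
--     "MATIC": ["MATIC", "MATICUSDT", "Polygon"],
--     "LTC": ["LTC", "LTCUSDT", "Litecoin"],
--     "UNI": ["UNI", "UNIUSDT", "Uniswap"],
--     "BCH": ["BCH", "BCHUSDT", "Bitcoin Cash"],
--     "LINK": ["LINK", "LINKUSDT", "Chainlink"],
--     "USDC": ["USDC", "USDCUSDT", "USD Coin"],
--     "TON": ["TON", "TONUSDT", "Toncoin"],
--     "TRX": ["TRX", "TRXUSDT", "TRON"],
--     "LEO": ["LEO", "LEOUSDT", "UNUS SED LEO"],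
--     "DAI": ["DAI", "DAIUSDT", "Dai"],
--     "NEAR": ["NEAR", "NEARUSDT", "NEAR Protocol"],
-- }
--
--     for key, aliases in symbol_aliases.items():
--         if raw_symbol.upper() in [alias.upper() for alias in aliases]:
--             return f"{key}/USDT"
--     return None
-- ===== SOURCE B (Python) =====
-- # Standardized name -> human-readable full name; every other alias is derived:
-- # the key itself and key + "USDT".  So a lookup needs no alias table scan:
-- # uppercase, try the full-name index, try stripping a "USDT" suffix, try the key set.
-- _FULL_NAMES = {
--     "BINANCE COIN": "BNB",
--     "CARDANO": "ADA",
--     "SOLANA": "SOL",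
--     "RIPPLE": "XRP",
--     "POLKADOT": "DOT",
--     "DOGECOIN": "DOGE",
--     "AVALANCHE": "AVAX",
--     "SHIBA INU": "SHIB",
--     "POLYGON": "MATIC",
--     "LITECOIN": "LTC",
--     "UNISWAP": "UNI",
--     "BITCOIN CASH": "BCH",
--     "CHAINLINK": "LINK",
--     "USD COIN": "USDC",
--     "TONCOIN": "TON",
--     "TRON": "TRX",
--     "UNUS SED LEO": "LEO",
--     "DAI": "DAI",
--     "NEAR PROTOCOL": "NEAR",
-- }
-- _KEYS = frozenset(_FULL_NAMES.values())
--
--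
-- def standardize_symbol(raw_symbol):
--     u = raw_symbol.upper()
--     key = _FULL_NAMES.get(u)
--     if key is None and u.endswith("USDT"):
--         base = u[:-4]
--         if base in _KEYS:
--             key = base
--     if key is None and u in _KEYS:
--         key = u
--     return f"{key}/USDT" if key is not None else None
-- ===== Notes on version B (the rewrite author's own statement) =====
-- stated objective: alternative
-- what changed: A scans all 19 alias lists on every call, uppercasing each of the 57 aliases per call; B exploits the table's structure (each alias is the key itself, the key with a USDT suffix, or a full name) and instead does one lookup in a precomputed full-name index, one USDT-suffix strip checked against the key set, and one key-set test.
import Mathlib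
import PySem

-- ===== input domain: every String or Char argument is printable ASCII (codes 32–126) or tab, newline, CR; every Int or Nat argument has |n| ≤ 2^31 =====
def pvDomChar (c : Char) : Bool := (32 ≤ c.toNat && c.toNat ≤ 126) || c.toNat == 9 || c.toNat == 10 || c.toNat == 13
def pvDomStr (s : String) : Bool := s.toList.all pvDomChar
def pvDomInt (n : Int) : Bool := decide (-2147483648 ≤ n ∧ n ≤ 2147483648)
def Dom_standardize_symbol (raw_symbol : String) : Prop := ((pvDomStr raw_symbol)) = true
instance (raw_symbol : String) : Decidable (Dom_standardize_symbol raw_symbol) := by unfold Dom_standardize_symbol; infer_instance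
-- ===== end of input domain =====

-- B replaces A's per-call scan over 19 alias lists by structure: every alias is the key itself,
-- key+"USDT" or a full name, so B does one full-name index lookup, one "USDT" suffix strip
-- checked against the key set, and one key-set test (alternative decomposition, no table scan).

-- ===== PORT A =====
-- the literal alias table of A (dict ported as an insertion-ordered association list)
def pvAliasTableA : List (String × List String) :=
  [("BNB", ["BNB", "BNBUSDT", "Binance Coin"]),
   ("ADA", ["ADA", "ADAUSDT", "Cardano"]),
   ("SOL", ["SOL", "SOLUSDT", "Solana"]),
   ("XRP", ["XRP", "XRPUSDT", "Ripple"]),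
   ("DOT", ["DOT", "DOTUSDT", "Polkadot"]),
   ("DOGE", ["DOGE", "DOGEUSDT", "Dogecoin"]),
   ("AVAX", ["AVAX", "AVAXUSDT", "Avalanche"]),
   ("SHIB", ["SHIB", "SHIBUSDT", "Shiba Inu"]),
   ("MATIC", ["MATIC", "MATICUSDT", "Polygon"]),
   ("LTC", ["LTC", "LTCUSDT", "Litecoin"]),
   ("UNI", ["UNI", "UNIUSDT", "Uniswap"]),
   ("BCH", ["BCH", "BCHUSDT", "Bitcoin Cash"]),
   ("LINK", ["LINK", "LINKUSDT", "Chainlink"]),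
   ("USDC", ["USDC", "USDCUSDT", "USD Coin"]),
   ("TON", ["TON", "TONUSDT", "Toncoin"]),
   ("TRX", ["TRX", "TRXUSDT", "TRON"]),
   ("LEO", ["LEO", "LEOUSDT", "UNUS SED LEO"]),
   ("DAI", ["DAI", "DAIUSDT", "Dai"]),
   ("NEAR", ["NEAR", "NEARUSDT", "NEAR Protocol"])]

-- A's for-loop over symbol_aliases.items(): first key whose uppercased alias list contains raw_symbol.upper()
def pvScanA (raw_symbol : String) : List (String × List String) → Option String
  | [] => none
  | (key, aliases) :: rest =>
    if PySem.Str.upper raw_symbol ∈ aliases.map PySem.Str.upper then some (key ++ "/USDT")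
    else pvScanA raw_symbol rest

def standardize_symbol (raw_symbol : String) : Option String :=
  pvScanA raw_symbol pvAliasTableA

-- ===== PORT B =====
-- B's full-name index: UPPERCASED FULL NAME -> standardized key
def pvFullNamesB : PySem.Dict String String :=
  PySem.Dict.mk
  [("BINANCE COIN", "BNB"),
   ("CARDANO", "ADA"),
   ("SOLANA", "SOL"),
   ("RIPPLE", "XRP"),
   ("POLKADOT", "DOT"),
   ("DOGECOIN", "DOGE"),
   ("AVALANCHE", "AVAX"),
   ("SHIBA INU", "SHIB"),
   ("POLYGON", "MATIC"),
   ("LITECOIN", "LTC"),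
   ("UNISWAP", "UNI"),
   ("BITCOIN CASH", "BCH"),
   ("CHAINLINK", "LINK"),
   ("USD COIN", "USDC"),
   ("TONCOIN", "TON"),
   ("TRON", "TRX"),
   ("UNUS SED LEO", "LEO"),
   ("DAI", "DAI"),
   ("NEAR PROTOCOL", "NEAR")]

-- B's key set: frozenset(_FULL_NAMES.values())
def pvKeysB : PySem.Set String := PySem.Set.ofList pvFullNamesB.values

def standardize_symbol_alt (raw_symbol : String) : Option String :=
  let u := PySem.Str.upper raw_symbol
  let key := pvFullNamesB.get? u
  let key :=
    if key.isNone && PySem.Str.endswith u "USDT" then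
      let base := PySem.Str.slice u none (some (-4))
      if pvKeysB.contains base then some base else key
    else key
  let key := if key.isNone && pvKeysB.contains u then some u else key
  match key with
  | some k => some (k ++ "/USDT")
  | none => none

-- ===== PRECONDITION & SPEC =====
def Spec_standardize_symbol (raw_symbol : String) (out : Option String) : Prop := out = standardize_symbol_alt raw_symbol
instance (raw_symbol : String) (out : Option String) : Decidable (Spec_standardize_symbol raw_symbol out) := by unfold Spec_standardize_symbol; infer_instance

-- ===== CLAIM (what is proved, stated in full; the proofs are below) =====
def Claim_equal_standardize_symbol : Prop := ∀ (raw_symbol : String), Dom_standardize_symbol raw_symbol → Spec_standardize_symbol raw_symbol (standardize_symbol raw_symbol)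

-- ===== LEMMAS AND PROOFS =====

-- every string literal either program compares the uppercased input with (56 distinct values)
def pvLits : List String := ["BNB", "BNBUSDT", "BINANCE COIN", "ADA", "ADAUSDT", "CARDANO", "SOL", "SOLUSDT", "SOLANA", "XRP", "XRPUSDT", "RIPPLE", "DOT", "DOTUSDT", "POLKADOT", "DOGE", "DOGEUSDT", "DOGECOIN", "AVAX", "AVAXUSDT", "AVALANCHE", "SHIB", "SHIBUSDT", "SHIBA INU", "MATIC", "MATICUSDT", "POLYGON", "LTC", "LTCUSDT", "LITECOIN", "UNI", "UNIUSDT", "UNISWAP", "BCH", "BCHUSDT", "BITCOIN CASH", "LINK", "LINKUSDT", "CHAINLINK", "USDC", "USDCUSDT", "USD COIN", "TON", "TONUSDT", "TONCOIN", "TRX", "TRXUSDT", "TRON", "LEO", "LEOUSDT", "UNUS SED LEO", "DAI", "DAIUSDT", "NEAR", "NEARUSDT", "NEAR PROTOCOL"]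

-- a string ending in "USDT" is its [:-4] slice with "USDT" re-appended
lemma pvSplit (u : String) (hE : PySem.Str.endswith u "USDT" = true) :
    u = PySem.Str.slice u none (some (-4)) ++ "USDT" := by
  have hsuf : "USDT".toList <:+ u.toList := by
    rw [PySem.Str.endswith] at hE
    exact (PySem.Chars.endswith_iff _ _).mp hE
  obtain ⟨p, hp⟩ := hsuf
  have hlen : u.toList.length = p.length + 4 := by rw [← hp]; simp
  have htake : u.toList.take (u.toList.length - 4) = p := by
    rw [hlen, Nat.add_sub_cancel, ← hp, List.take_left' rfl]
  apply String.toList_inj.mp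
  rw [String.toList_append, PySem.Str.toList_slice, PySem.Chars.slice_eq_listSlice,
      PySem.List.slice_to_neg_ofNat _ 4 (by omega), htake, hp]

-- ===== VERDICT (by name: the statement is the Claim_ definition above) =====
set_option maxHeartbeats 2000000 in
theorem standardize_symbol_spec : Claim_equal_standardize_symbol := by
  intro raw _
  unfold Spec_standardize_symbol standardize_symbol standardize_symbol_alt
  have e1 : List.map PySem.Str.upper ["BNB", "BNBUSDT", "Binance Coin"] = ["BNB", "BNBUSDT", "BINANCE COIN"] := by decide
  have e2 : List.map PySem.Str.upper ["ADA", "ADAUSDT", "Cardano"] = ["ADA", "ADAUSDT", "CARDANO"] := by decide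
  have e3 : List.map PySem.Str.upper ["SOL", "SOLUSDT", "Solana"] = ["SOL", "SOLUSDT", "SOLANA"] := by decide
  have e4 : List.map PySem.Str.upper ["XRP", "XRPUSDT", "Ripple"] = ["XRP", "XRPUSDT", "RIPPLE"] := by decide
  have e5 : List.map PySem.Str.upper ["DOT", "DOTUSDT", "Polkadot"] = ["DOT", "DOTUSDT", "POLKADOT"] := by decide
  have e6 : List.map PySem.Str.upper ["DOGE", "DOGEUSDT", "Dogecoin"] = ["DOGE", "DOGEUSDT", "DOGECOIN"] := by decide
  have e7 : List.map PySem.Str.upper ["AVAX", "AVAXUSDT", "Avalanche"] = ["AVAX", "AVAXUSDT", "AVALANCHE"] := by decide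
  have e8 : List.map PySem.Str.upper ["SHIB", "SHIBUSDT", "Shiba Inu"] = ["SHIB", "SHIBUSDT", "SHIBA INU"] := by decide
  have e9 : List.map PySem.Str.upper ["MATIC", "MATICUSDT", "Polygon"] = ["MATIC", "MATICUSDT", "POLYGON"] := by decide
  have e10 : List.map PySem.Str.upper ["LTC", "LTCUSDT", "Litecoin"] = ["LTC", "LTCUSDT", "LITECOIN"] := by decide
  have e11 : List.map PySem.Str.upper ["UNI", "UNIUSDT", "Uniswap"] = ["UNI", "UNIUSDT", "UNISWAP"] := by decide
  have e12 : List.map PySem.Str.upper ["BCH", "BCHUSDT", "Bitcoin Cash"] = ["BCH", "BCHUSDT", "BITCOIN CASH"] := by decide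
  have e13 : List.map PySem.Str.upper ["LINK", "LINKUSDT", "Chainlink"] = ["LINK", "LINKUSDT", "CHAINLINK"] := by decide
  have e14 : List.map PySem.Str.upper ["USDC", "USDCUSDT", "USD Coin"] = ["USDC", "USDCUSDT", "USD COIN"] := by decide
  have e15 : List.map PySem.Str.upper ["TON", "TONUSDT", "Toncoin"] = ["TON", "TONUSDT", "TONCOIN"] := by decide
  have e16 : List.map PySem.Str.upper ["TRX", "TRXUSDT", "TRON"] = ["TRX", "TRXUSDT", "TRON"] := by decide
  have e17 : List.map PySem.Str.upper ["LEO", "LEOUSDT", "UNUS SED LEO"] = ["LEO", "LEOUSDT", "UNUS SED LEO"] := by decide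
  have e18 : List.map PySem.Str.upper ["DAI", "DAIUSDT", "Dai"] = ["DAI", "DAIUSDT", "DAI"] := by decide
  have e19 : List.map PySem.Str.upper ["NEAR", "NEARUSDT", "NEAR Protocol"] = ["NEAR", "NEARUSDT", "NEAR PROTOCOL"] := by decide
  simp only [pvAliasTableA, pvScanA, e1, e2, e3, e4, e5, e6, e7, e8, e9, e10, e11, e12, e13, e14, e15, e16, e17, e18, e19]
  generalize PySem.Str.upper raw = u
  have ek : pvKeysB = ["BNB", "ADA", "SOL", "XRP", "DOT", "DOGE", "AVAX", "SHIB", "MATIC", "LTC", "UNI", "BCH", "LINK", "USDC", "TON", "TRX", "LEO", "DAI", "NEAR"] := by decide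
  by_cases hu : u ∈ pvLits
  · simp only [pvLits, List.mem_cons, List.not_mem_nil, or_false] at hu
    rcases hu with rfl|rfl|rfl|rfl|rfl|rfl|rfl|rfl|rfl|rfl|rfl|rfl|rfl|rfl|rfl|rfl|rfl|rfl|rfl|rfl|rfl|rfl|rfl|rfl|rfl|rfl|rfl|rfl|rfl|rfl|rfl|rfl|rfl|rfl|rfl|rfl|rfl|rfl|rfl|rfl|rfl|rfl|rfl|rfl|rfl|rfl|rfl|rfl|rfl|rfl|rfl|rfl|rfl|rfl|rfl|rfl <;> decide
  · simp only [pvLits, List.mem_cons, List.not_mem_nil, or_false, not_or] at hu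
    obtain ⟨n1, n2, n3, n4, n5, n6, n7, n8, n9, n10, n11, n12, n13, n14, n15, n16, n17, n18, n19, n20, n21, n22, n23, n24, n25, n26, n27, n28, n29, n30, n31, n32, n33, n34, n35, n36, n37, n38, n39, n40, n41, n42, n43, n44, n45, n46, n47, n48, n49, n50, n51, n52, n53, n54, n55, n56⟩ := hu
    have hget : pvFullNamesB.get? u = none := by
      simp [pvFullNamesB, PySem.Dict.get?, beq_iff_eq, n1, Ne.symm n1, n2, Ne.symm n2, n3, Ne.symm n3, n4, Ne.symm n4, n5, Ne.symm n5, n6, Ne.symm n6, n7, Ne.symm n7, n8, Ne.symm n8, n9, Ne.symm n9, n10, Ne.symm n10, n11, Ne.symm n11, n12, Ne.symm n12, n13, Ne.symm n13, n14, Ne.symm n14, n15, Ne.symm n15, n16, Ne.symm n16, n17, Ne.symm n17, n18, Ne.symm n18, n19, Ne.symm n19, n20, Ne.symm n20, n21, Ne.symm n21, n22, Ne.symm n22, n23, Ne.symm n23, n24, Ne.symm n24, n25, Ne.symm n25, n26, Ne.symm n26, n27, Ne.symm n27, n28, Ne.symm n28, n29, Ne.symm n29, n30, Ne.symm n30, n31,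 Ne.symm n31, n32, Ne.symm n32, n33, Ne.symm n33, n34, Ne.symm n34, n35, Ne.symm n35, n36, Ne.symm n36, n37, Ne.symm n37, n38, Ne.symm n38, n39, Ne.symm n39, n40, Ne.symm n40, n41, Ne.symm n41, n42, Ne.symm n42, n43, Ne.symm n43, n44, Ne.symm n44, n45, Ne.symm n45, n46, Ne.symm n46, n47, Ne.symm n47, n48, Ne.symm n48, n49, Ne.symm n49, n50, Ne.symm n50, n51, Ne.symm n51, n52, Ne.symm n52, n53, Ne.symm n53, n54, Ne.symm n54, n55, Ne.symm n55, n56, Ne.symm n56]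
    have hmu : u ∉ pvKeysB := by
      rw [ek]
      simp [n1, n2, n3, n4, n5, n6, n7, n8, n9, n10, n11, n12, n13, n14, n15, n16, n17, n18, n19, n20, n21, n22, n23, n24, n25, n26, n27, n28, n29, n30, n31, n32, n33, n34, n35, n36, n37, n38, n39, n40, n41, n42, n43, n44, n45, n46, n47, n48, n49, n50, n51, n52, n53, n54, n55, n56]
    by_cases hE : PySem.Str.endswith u "USDT" = true
    · have hsp := pvSplit u hE
      have hEc : PySem.Chars.endswith u.toList ['U', 'S', 'D', 'T'] = true := by
        rw [PySem.Str.endswith] at hE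
        simpa using hE
      have hmb : PySem.Str.slice u none (some (-4)) ∉ pvKeysB := by
        rw [ek]
        simp only [List.mem_cons, List.not_mem_nil, or_false]
        rintro (h|h|h|h|h|h|h|h|h|h|h|h|h|h|h|h|h|h|h)
        · exact n2 (hsp.trans (by rw [h]; decide))
        · exact n5 (hsp.trans (by rw [h]; decide))
        · exact n8 (hsp.trans (by rw [h]; decide))
        · exact n11 (hsp.trans (by rw [h]; decide))
        · exact n14 (hsp.trans (by rw [h]; decide))
        · exact n17 (hsp.trans (by rw [h]; decide))
        · exact n20 (hsp.trans (by rw [h]; decide))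
        · exact n23 (hsp.trans (by rw [h]; decide))
        · exact n26 (hsp.trans (by rw [h]; decide))
        · exact n29 (hsp.trans (by rw [h]; decide))
        · exact n32 (hsp.trans (by rw [h]; decide))
        · exact n35 (hsp.trans (by rw [h]; decide))
        · exact n38 (hsp.trans (by rw [h]; decide))
        · exact n41 (hsp.trans (by rw [h]; decide))
        · exact n44 (hsp.trans (by rw [h]; decide))
        · exact n47 (hsp.trans (by rw [h]; decide))
        · exact n50 (hsp.trans (by rw [h]; decide))
        · exact n53 (hsp.trans (by rw [h]; decide))
        · exact n55 (hsp.trans (by rw [h]; decide))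
      simp [hget, hEc, hmu, hmb, n1, n2, n3, n4, n5, n6, n7, n8, n9, n10, n11, n12, n13, n14, n15, n16, n17, n18, n19, n20, n21, n22, n23, n24, n25, n26, n27, n28, n29, n30, n31, n32, n33, n34, n35, n36, n37, n38, n39, n40, n41, n42, n43, n44, n45, n46, n47, n48, n49, n50, n51, n52, n53, n54, n55, n56]
    · rw [Bool.not_eq_true] at hE
      have hEc : PySem.Chars.endswith u.toList ['U', 'S', 'D', 'T'] = false := by
        rw [PySem.Str.endswith] at hE
        simpa using hE
      simp [hget, hEc, hmu, n1, n2, n3, n4, n5, n6, n7, n8, n9, n10, n11, n12, n13, n14, n15, n16, n17, n18, n19, n20, n21, n22, n23, n24, n25, n26, n27, n28, n29, n30, n31, n32, n33, n34, n35, n36, n37, n38, n39, n40, n41, n42, n43, n44, n45, n46, n47, n48, n49, n50, n51, n52, n53, n54, n55, n56]
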